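-- pv_equiv track=rewrite | github.com/idapython/src | tools/wrapper_utils.py | _is_fundecl
-- ===== SOURCE A (Python) =====
-- def _is_fundecl(line):
--     if len(line) <= 2:
--         return None
--     if line[0:1].isspace():
--         return None
--     if line[len(line)-1:] != "{":
--         return None
--     open_paren_idx = line.find("(")
--     if open_paren_idx == -1 or line.find(")") == -1:
--         return None
--     part = line[0:open_paren_idx]
--     for idx in range(len(part) - 1, 0, -1):
--         c = part[idx]
--         if not c.isalnum() and c not in ["_"]:
--             return part[idx+1:]
-- ===== SOURCE B (Python) =====
-- def _is_fundecl(line):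
--     if len(line) <= 2 or line[0:1].isspace() or line[-1:] != "{":
--         return None
--     open_idx = line.find("(")
--     if open_idx == -1 or line.find(")") == -1:
--         return None
--     part = line[:open_idx]
--     # single forward pass: remember the index of the LAST non-identifier character
--     cut = -1
--     for i, c in enumerate(part):
--         if not (c.isalnum() or c == "_"):
--             cut = i
--     return part[cut + 1:] if cut >= 1 else None
-- ===== Notes on version B (the rewrite author's own statement) =====
-- stated objective: alternative
-- what changed: A scans the pre-paren part backwards and returns at the first non-identifier character; B makes one forward pass over that part with an accumulator holding the index of the last non-identifier character seen, then decides by the closed-form test cut >= 1 between the slice part[cut+1:] and None.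
import Mathlib
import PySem

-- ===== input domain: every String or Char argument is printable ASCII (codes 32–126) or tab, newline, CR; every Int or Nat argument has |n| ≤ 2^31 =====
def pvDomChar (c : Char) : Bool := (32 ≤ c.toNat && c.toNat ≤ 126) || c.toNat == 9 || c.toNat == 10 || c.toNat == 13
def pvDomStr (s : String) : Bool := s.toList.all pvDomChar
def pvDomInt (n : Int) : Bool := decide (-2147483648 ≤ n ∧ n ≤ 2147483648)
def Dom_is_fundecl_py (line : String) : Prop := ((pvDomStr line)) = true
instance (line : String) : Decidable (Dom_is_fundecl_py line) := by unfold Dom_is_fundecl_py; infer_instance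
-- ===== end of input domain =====

-- B replaces A's backward early-return scan by ONE forward pass accumulating the index of
-- the last non-identifier character, then a closed-form test (objective: alternative).

-- ===== PORT A =====
-- the for-loop 'for idx in range(len(part)-1, 0, -1)' with its early return
def pvALoop (part : List Char) (idx : Int) : Option String :=
  if h : 1 ≤ idx then
    let c := (PySem.List.pyGet? part idx).getD ' '
    if !(PySem.Chars.isalnum c) && !(List.contains ['_'] c) then
      some (String.mk (PySem.List.slice part (some (idx + 1)) none))
    else pvALoop part (idx - 1)
  else none
termination_by idx.toNat
decreasing_by omega

def is_fundecl_py (line : String) : Option String :=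
  let cs := line.toList
  if cs.length ≤ 2 then none
  else if PySem.Chars.strIsspace (PySem.List.slice cs (some 0) (some 1)) then none
  else if PySem.List.slice cs (some ((cs.length : Int) - 1)) none ≠ ['{'] then none
  else
    let openIdx := PySem.Chars.find cs ['(']
    if openIdx = -1 ∨ PySem.Chars.find cs [')'] = -1 then none
    else
      let part := PySem.List.slice cs (some 0) (some openIdx)
      pvALoop part ((part.length : Int) - 1)

-- ===== PORT B =====
-- 'for i, c in enumerate(part): if not (c.isalnum() or c == "_"): cut = i'
def pvBStep (acc : Int) (ic : Int × Char) : Int :=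
  if !(PySem.Chars.isalnum ic.2 || ic.2 == '_') then ic.1 else acc

def is_fundecl_py_alt (line : String) : Option String :=
  let cs := line.toList
  if cs.length ≤ 2 ∨ PySem.Chars.strIsspace (PySem.List.slice cs (some 0) (some 1))
      ∨ PySem.List.slice cs (some (-1)) none ≠ ['{'] then none
  else
    let openIdx := PySem.Chars.find cs ['(']
    if openIdx = -1 ∨ PySem.Chars.find cs [')'] = -1 then none
    else
      let part := PySem.List.slice cs (some 0) (some openIdx)
      let cut := (PySem.List.enumerate part).foldl pvBStep (-1)
      if 1 ≤ cut then some (String.mk (PySem.List.slice part (some (cut + 1)) none)) else none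

-- ===== PRECONDITION & SPEC =====
def Spec_is_fundecl_py (line : String) (out : Option String) : Prop := out = is_fundecl_py_alt line
instance (line : String) (out : Option String) : Decidable (Spec_is_fundecl_py line out) := by unfold Spec_is_fundecl_py; infer_instance

-- ===== CLAIM (what is proved, stated in full; the proofs are below) =====
def Claim_equal_is_fundecl_py : Prop := ∀ (line : String), Dom_is_fundecl_py line → Spec_is_fundecl_py line (is_fundecl_py line)

-- ===== LEMMAS AND PROOFS =====

-- B's fold restricted to the first k characters of part
def pvCut (part : List Char) (k : Nat) : Int :=
  ((PySem.List.enumerate (part.take k)).foldl pvBStep (-1))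

lemma pvCut_succ (part : List Char) (k : Nat) (hk : k < part.length) :
    pvCut part (k + 1)
      = if !(PySem.Chars.isalnum (part.getD k ' ') || part.getD k ' ' == '_')
        then (k : Int) else pvCut part k := by
  unfold pvCut
  have htake : part.take (k + 1) = part.take k ++ [part[k]] := by
    rw [List.take_succ, List.getElem?_eq_getElem hk]; rfl
  have hlen : (part.take k).length = k := by
    rw [List.length_take]; omega
  rw [htake, PySem.List.enumerate_append, List.foldl_append, hlen]
  have hgd : part.getD k ' ' = part[k] := by
    rw [List.getD_eq_getElem?_getD, List.getElem?_eq_getElem hk]; rfl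
  simp [pvBStep, List.getElem?_eq_getElem hk]

lemma pvCut_le (part : List Char) (k : Nat) : pvCut part k ≤ (k : Int) - 1 := by
  induction k with
  | zero =>
    unfold pvCut
    simp [PySem.List.enumerate]
  | succ k ih =>
    by_cases hk : k < part.length
    · rw [pvCut_succ part k hk]
      split <;> [omega; skip]
      · exact le_trans ih (by omega)
    · unfold pvCut at ih ⊢
      rw [List.take_of_length_le (by omega : part.length ≤ k)] at ih
      rw [List.take_of_length_le (by omega : part.length ≤ k + 1)]
      exact le_trans ih (by omega)

-- A's return test is the negation of B's assignment test
lemma pvPredA (d : Char) :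
    (!(PySem.Chars.isalnum d) && !(List.contains ['_'] d))
      = !(PySem.Chars.isalnum d || d == '_') := by
  cases h : PySem.Chars.isalnum d <;> cases h2 : (d == '_') <;> simp_all

-- the backward scan of A equals the forward accumulation of B up to the same index
lemma pvLoop_eq (part : List Char) (idx : Nat) (hidx : idx < part.length) :
    pvALoop part (idx : Int) =
      if 1 ≤ pvCut part (idx + 1) then
        some (String.mk (PySem.List.slice part (some (pvCut part (idx + 1) + 1)) none))
      else none := by
  induction idx with
  | zero =>
    rw [pvALoop, dif_neg (by omega)]
    have := pvCut_le part (0 + 1)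
    rw [if_neg (by omega)]
  | succ k ih =>
    rw [pvALoop, dif_pos (by omega : (1 : Int) ≤ ((k + 1 : Nat) : Int))]
    dsimp only
    have hget : (PySem.List.pyGet? part ((k + 1 : Nat) : Int)).getD ' '
        = part.getD (k + 1) ' ' := by
      rw [PySem.List.pyGet?_natCast, List.getD_eq_getElem?_getD]
    rw [hget, pvPredA]
    rw [pvCut_succ part (k + 1) hidx]
    by_cases hp : (PySem.Chars.isalnum (part.getD (k + 1) ' ')
        || part.getD (k + 1) ' ' == '_') = true
    · -- identifier char: A keeps scanning, B's cut is unchanged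
      rw [hp]
      simp only [Bool.not_true, Bool.false_eq_true, if_false]
      have harg : ((k + 1 : Nat) : Int) - 1 = ((k : Nat) : Int) := by push_cast; ring
      rw [harg, ih (by omega)]
    · -- non-identifier char at index k+1 ≥ 1: A returns, B's cut is exactly k+1
      have hp' : (PySem.Chars.isalnum (part.getD (k + 1) ' ')
          || part.getD (k + 1) ' ' == '_') = false := by
        cases h : (PySem.Chars.isalnum (part.getD (k + 1) ' ')
            || part.getD (k + 1) ' ' == '_') with
        | false => rfl
        | true => exact absurd h hp
      rw [hp']
      simp only [Bool.not_false, if_true]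
      rw [if_pos (by push_cast; omega)]

-- line[len(line)-1:] and line[-1:] are the same suffix
lemma pvSlice_last (cs : List Char) :
    PySem.List.slice cs (some ((cs.length : Int) - 1)) none
      = PySem.List.slice cs (some (-1)) none := by
  rcases cs with _ | ⟨c, cs⟩
  · rfl
  · have h1 : (((c :: cs).length : Int) - 1) = (((c :: cs).length - 1 : Nat) : Int) := by
      simp
    rw [h1, PySem.List.slice_from_natCast, PySem.List.slice_from_neg_one]

-- ===== VERDICT (by name: the statement is the Claim_ definition above) =====
theorem is_fundecl_py_spec : Claim_equal_is_fundecl_py := by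
  intro line _
  unfold Spec_is_fundecl_py is_fundecl_py is_fundecl_py_alt
  dsimp only
  set cs := line.toList with hcs
  by_cases h2 : cs.length ≤ 2
  · rw [if_pos h2, if_pos (Or.inl h2)]
  · rw [if_neg h2]
    by_cases hsp : PySem.Chars.strIsspace (PySem.List.slice cs (some 0) (some 1)) = true
    · rw [if_pos hsp, if_pos (Or.inr (Or.inl hsp))]
    · rw [if_neg hsp]
      by_cases hbr : PySem.List.slice cs (some ((cs.length : Int) - 1)) none ≠ ['{']
      · rw [if_pos hbr, if_pos (Or.inr (Or.inr (by rw [← pvSlice_last]; exact hbr)))]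
      · have hguard : ¬(cs.length ≤ 2 ∨
            PySem.Chars.strIsspace (PySem.List.slice cs (some 0) (some 1)) = true ∨
            PySem.List.slice cs (some (-1)) none ≠ ['{']) := by
          rintro (hc | hc | hc)
          · exact h2 hc
          · exact hsp hc
          · exact hc (by rw [← pvSlice_last]; exact not_not.mp hbr)
        rw [if_neg hbr, if_neg hguard]
        by_cases hf : PySem.Chars.find cs ['('] = -1 ∨ PySem.Chars.find cs [')'] = -1
        · rw [if_pos hf, if_pos hf]
        · rw [if_neg hf, if_neg hf]
          set part := PySem.List.slice cs (some 0) (some (PySem.Chars.find cs ['('])) with hpart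
          rcases Nat.eq_zero_or_pos part.length with hn | hn
          · -- part empty: both sides give None
            rw [List.length_eq_zero_iff.mp hn]
            rw [pvALoop]
            rw [dif_neg (by norm_num)]
            have : pvCut ([] : List Char) 0 = -1 := by unfold pvCut; simp [PySem.List.enumerate]
            unfold pvCut at this
            simp only [List.take_nil] at this
            rw [this, if_neg (by omega)]
          · have hcast : ((part.length : Int) - 1) = ((part.length - 1 : Nat) : Int) := by
              omega
            rw [hcast, pvLoop_eq part (part.length - 1) (by omega)]
            have hfull : part.length - 1 + 1 = part.length := by omega
            rw [hfull]
            unfold pvCut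
            rw [List.take_of_length_le (le_refl _)]
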